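-- pv_equiv track=rewrite | github.com/mdthewzrd/ce-hub | projects/ig-scraper-brander/web_app/ai_caption_service.py | improve_caption_spacing
-- ===== SOURCE A (Python) =====
-- def improve_caption_spacing(caption: str) -> str:
--     """
--     Improve caption spacing for better Instagram readability
--
--     Ensures proper paragraph breaks and visual rhythm
--     """
--     lines = caption.split('\n')
--     formatted_lines = []
--     prev_was_content = False
--
--     for line in lines:
--         stripped = line.strip()
--         is_empty = not stripped
--
--         if not is_empty:
--             # If we have 2+ consecutive content lines, add a break between them
--             if prev_was_content:
--                 # Check if previous line was substantial enough to need a break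
--                 if len(formatted_lines) > 0 and len(formatted_lines[-1]) > 40:
--                     formatted_lines.append("")  # Add empty line for paragraph break
--                 formatted_lines.append(stripped)
--             else:
--                 formatted_lines.append(stripped)
--             prev_was_content = True
--         else:
--             # Skip multiple consecutive empty lines
--             if not formatted_lines or formatted_lines[-1] != "":
--                 formatted_lines.append("")
--             prev_was_content = False
--
--     # Clean up any trailing empty lines
--     while formatted_lines and formatted_lines[-1] == "":
--         formatted_lines.pop()
--
--     return '\n'.join(formatted_lines)
-- ===== SOURCE B (Python) =====
-- def improve_caption_spacing(caption: str) -> str: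
--     # Pass 1: strip lines and collapse blank runs to a single '' (leading blank kept).
--     cleaned = []
--     for line in caption.split('\n'):
--         s = line.strip()
--         if s or not cleaned or cleaned[-1]:
--             cleaned.append(s)
--     # Drop trailing blanks.
--     while cleaned and not cleaned[-1]:
--         cleaned.pop()
--     if not cleaned:
--         return ''
--     # Pass 2: insert a paragraph break between adjacent content lines when the
--     # earlier one is longer than 40 characters.
--     out = [cleaned[0]]
--     for prev, cur in zip(cleaned, cleaned[1:]):
--         if cur and prev and len(prev) > 40:
--             out.append('')
--         out.append(cur)
--     return '\n'.join(out)
-- ===== Notes on version B (the rewrite author's own statement) =====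
-- stated objective: alternative
-- what changed: Replaces A's single loop with a prev_was_content flag and interleaved break insertion by two passes: first collapse stripped lines' blank runs and trim, then a pairwise zip pass that inserts a paragraph break between adjacent content lines whose predecessor exceeds 40 chars.
import Mathlib
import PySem

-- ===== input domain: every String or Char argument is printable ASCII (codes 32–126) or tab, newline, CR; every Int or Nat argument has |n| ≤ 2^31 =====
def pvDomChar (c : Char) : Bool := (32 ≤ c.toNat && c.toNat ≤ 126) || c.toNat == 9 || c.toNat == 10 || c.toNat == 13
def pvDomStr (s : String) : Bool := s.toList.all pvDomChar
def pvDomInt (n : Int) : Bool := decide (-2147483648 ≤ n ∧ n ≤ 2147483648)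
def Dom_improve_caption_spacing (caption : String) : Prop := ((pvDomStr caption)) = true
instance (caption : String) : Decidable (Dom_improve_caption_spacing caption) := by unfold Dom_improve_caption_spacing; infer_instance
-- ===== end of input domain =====

-- B replaces A's one-pass loop with a prev_was_content flag by two passes (collapse blank
-- runs + trim, then a pairwise zip pass inserting the >40-char paragraph breaks): an
-- alternative decomposition of the same O(n) task, not claimed faster.


-- ===== PORT A =====
def improve_caption_spacing (caption : String) : String :=
  -- caption.split('\n'): sep "\n" ≠ "", so split? is always `some`; .getD [] is exact
  let lines := (PySem.Str.split? caption "\n").getD []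
  let st := lines.foldl (fun (st : List String × Bool) line =>
      let stripped := PySem.Str.strip line
      if stripped ≠ "" then
        (if st.2 then
          -- formatted_lines[-1] is guarded by len(formatted_lines) > 0, so getLastD is exact
          ((if PySem.List.len st.1 > 0 ∧ PySem.Str.len (st.1.getLastD "") > 40 then
              st.1 ++ [""] else st.1) ++ [stripped], true)
         else (st.1 ++ [stripped], true))
      else
        ((if st.1 = [] ∨ st.1.getLastD "" ≠ "" then st.1 ++ [""] else st.1), false))
    ([], false)
  -- while formatted_lines and formatted_lines[-1] == "": pop()  — drop the trailing run of ""
  PySem.Str.join "\n" ((st.1.reverse.dropWhile (· = "")).reverse)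

-- ===== PORT B =====
def improve_caption_spacing_alt (caption : String) : String :=
  let lines := (PySem.Str.split? caption "\n").getD []
  -- pass 1: collapse blank runs (cleaned[-1] read as getLastD, guarded by `acc = []`)
  let cleaned := lines.foldl (fun acc line =>
      let s := PySem.Str.strip line
      if s ≠ "" ∨ acc = [] ∨ acc.getLastD "" ≠ "" then acc ++ [s] else acc) []
  -- while cleaned and not cleaned[-1]: pop()
  let trimmed := (cleaned.reverse.dropWhile (· = "")).reverse
  match trimmed with
  | [] => ""
  | c0 :: rest =>
    -- pass 2: for prev, cur in zip(cleaned, cleaned[1:])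
    PySem.Str.join "\n" ((trimmed.zip rest).foldl
      (fun out (p : String × String) =>
        (if p.2 ≠ "" ∧ p.1 ≠ "" ∧ PySem.Str.len p.1 > 40 then out ++ [""] else out) ++ [p.2])
      [c0])

-- ===== PRECONDITION & SPEC =====
def Spec_improve_caption_spacing (caption : String) (out : String) : Prop := out = improve_caption_spacing_alt caption
instance (caption : String) (out : String) : Decidable (Spec_improve_caption_spacing caption out) := by unfold Spec_improve_caption_spacing; infer_instance

-- ===== CLAIM (what is proved, stated in full; the proofs are below) =====
def Claim_equal_improve_caption_spacing : Prop := ∀ (caption : String), Dom_improve_caption_spacing caption → Spec_improve_caption_spacing caption (improve_caption_spacing caption)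

-- ===== LEMMAS AND PROOFS =====

/-- Collapse runs of "" keeping the first of each run; `p` is the previously kept/seen line. -/
def pvCollapseAux (p : String) : List String → List String
  | [] => []
  | s :: t => if s = "" ∧ p = "" then pvCollapseAux p t else s :: pvCollapseAux s t

def pvCollapse : List String → List String
  | [] => []
  | s :: t => s :: pvCollapseAux s t

/-- Insert a "" before each non-empty line whose predecessor `p` is non-empty and longer than 40. -/
def pvExpandAux (p : String) : List String → List String
  | [] => []
  | s :: t => (if s ≠ "" ∧ p ≠ "" ∧ PySem.Str.len p > 40 then ["", s] else [s]) ++ pvExpandAux s t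

def pvExpand : List String → List String
  | [] => []
  | c :: t => c :: pvExpandAux c t

def pvTrim (l : List String) : List String := (l.reverse.dropWhile (· = "")).reverse

lemma pvGetLastD_app {α : Type} (l m : List α) (d : α) :
    (l ++ m).getLastD d = m.getLastD (l.getLastD d) := by
  induction l generalizing d with
  | nil => rfl
  | cons a l ih => simp only [List.cons_append, List.getLastD_cons, ih]

lemma pvCollapseAux_getLastD (t : List String) (p : String) :
    (pvCollapseAux p t).getLastD p = t.getLastD p := by
  induction t generalizing p with
  | nil => rfl
  | cons s t ih =>
    simp only [pvCollapseAux]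
    split_ifs with h
    · obtain ⟨hs, hp⟩ := h
      simp only [ih, List.getLastD_cons, hs, hp]
    · simp only [List.getLastD_cons, ih]

lemma pvCollapse_getLastD (xs : List String) :
    (pvCollapse xs).getLastD "" = xs.getLastD "" := by
  cases xs with
  | nil => rfl
  | cons s t => simp only [pvCollapse, List.getLastD_cons, pvCollapseAux_getLastD]

lemma pvCollapse_eq_nil (xs : List String) : pvCollapse xs = [] ↔ xs = [] := by
  cases xs <;> simp [pvCollapse]

lemma pvCollapseAux_snoc (t : List String) (p s : String) :
    pvCollapseAux p (t ++ [s]) =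
      if s = "" ∧ t.getLastD p = "" then pvCollapseAux p t else pvCollapseAux p t ++ [s] := by
  induction t generalizing p with
  | nil => simp [pvCollapseAux]
  | cons a t ih =>
    simp only [List.cons_append, pvCollapseAux, List.getLastD_cons]
    split_ifs with h <;> simp_all

lemma pvCollapse_snoc (xs : List String) (s : String) :
    pvCollapse (xs ++ [s]) =
      if s = "" ∧ xs ≠ [] ∧ xs.getLastD "" = "" then pvCollapse xs else pvCollapse xs ++ [s] := by
  cases xs with
  | nil => simp [pvCollapse, pvCollapseAux]
  | cons a t =>
    simp only [List.cons_append, pvCollapse, pvCollapseAux_snoc, List.getLastD_cons]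
    split_ifs with h h2 h2 <;> simp_all

lemma pvExpandAux_snoc (t : List String) (p s : String) :
    pvExpandAux p (t ++ [s]) =
      pvExpandAux p t ++
        (if s ≠ "" ∧ t.getLastD p ≠ "" ∧ PySem.Str.len (t.getLastD p) > 40 then ["", s] else [s]) := by
  induction t generalizing p with
  | nil => simp [pvExpandAux]
  | cons a t ih =>
    simp only [List.cons_append, pvExpandAux, List.getLastD_cons, ih, List.append_assoc]

lemma pvExpand_snoc (xs : List String) (s : String) :
    pvExpand (xs ++ [s]) =
      pvExpand xs ++
        (if s ≠ "" ∧ xs.getLastD "" ≠ "" ∧ PySem.Str.len (xs.getLastD "") > 40 then ["", s] else [s]) := by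
  cases xs with
  | nil => simp [pvExpand, pvExpandAux]
  | cons a t =>
    simp only [List.cons_append, pvExpand, pvExpandAux_snoc, List.getLastD_cons, List.cons_append]

lemma pvExpandAux_getLastD (t : List String) (p : String) :
    (pvExpandAux p t).getLastD p = t.getLastD p := by
  induction t generalizing p with
  | nil => rfl
  | cons s t ih =>
    simp only [pvExpandAux, List.getLastD_cons, pvGetLastD_app]
    split_ifs <;> simpa [List.getLastD_eq_getLast?] using ih s

lemma pvExpand_getLastD (c : List String) :
    (pvExpand c).getLastD "" = c.getLastD "" := by
  cases c with
  | nil => rfl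
  | cons a t => simp only [pvExpand, List.getLastD_cons, pvExpandAux_getLastD]

lemma pvExpand_eq_nil (c : List String) : pvExpand c = [] ↔ c = [] := by
  cases c <;> simp [pvExpand]

/-- A's loop, over the already-stripped lines. -/
lemma pvFoldA (xs : List String) :
    xs.foldl (fun (st : List String × Bool) stripped =>
      if stripped ≠ "" then
        (if st.2 then
          ((if PySem.List.len st.1 > 0 ∧ PySem.Str.len (st.1.getLastD "") > 40 then
              st.1 ++ [""] else st.1) ++ [stripped], true)
         else (st.1 ++ [stripped], true))
      else
        ((if st.1 = [] ∨ st.1.getLastD "" ≠ "" then st.1 ++ [""] else st.1), false))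
      ([], false)
    = (pvExpand (pvCollapse xs), decide (xs.getLastD "" ≠ "")) := by
  induction xs using List.reverseRecOn with
  | nil => rfl
  | append_singleton xs s ih =>
    rw [List.foldl_append, ih, List.foldl_cons, List.foldl_nil]
    have hlast : (pvExpand (pvCollapse xs)).getLast?.getD "" = xs.getLast?.getD "" := by
      have h1 := pvExpand_getLastD (pvCollapse xs)
      have h2 := pvCollapse_getLastD xs
      rw [List.getLastD_eq_getLast?, List.getLastD_eq_getLast?] at h1 h2
      rw [h1, h2]
    have hnil : pvExpand (pvCollapse xs) = [] ↔ xs = [] := by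
      rw [pvExpand_eq_nil, pvCollapse_eq_nil]
    have hsnoclast : (xs ++ [s]).getLast?.getD "" = s := by
      rw [← List.getLastD_eq_getLast?, pvGetLastD_app]; rfl
    have hlen : pvExpand (pvCollapse xs) ≠ [] →
        PySem.List.len (pvExpand (pvCollapse xs)) > 0 := by
      intro hfl
      rw [PySem.List.len_eq]
      exact_mod_cast List.length_pos_iff.mpr hfl
    by_cases hs : s = ""
    · subst hs
      rw [pvCollapse_snoc]
      by_cases hx : xs ≠ [] ∧ xs.getLastD "" = ""
      · rw [if_pos (show ("" = "" ∧ xs ≠ [] ∧ xs.getLastD "" = "") from ⟨rfl, hx⟩)]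
        have hx2 := hx.2
        rw [List.getLastD_eq_getLast?] at hx2
        have hne := hx.1
        simp_all
      · rw [if_neg (show ¬("" = "" ∧ xs ≠ [] ∧ xs.getLastD "" = "") from fun h => hx h.2), pvExpand_snoc]
        have hor : xs = [] ∨ xs.getLastD "" ≠ "" := by
          rcases Decidable.em (xs = []) with h | h
          · exact Or.inl h
          · exact Or.inr (fun hl => hx ⟨h, hl⟩)
        have hor2 := hor
        rw [List.getLastD_eq_getLast?] at hor2
        simp_all
    · rw [pvCollapse_snoc, if_neg (show ¬(s = "" ∧ xs ≠ [] ∧ xs.getLastD "" = "") from fun h => hs h.1), pvExpand_snoc]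
      have hcl := pvCollapse_getLastD xs
      rw [List.getLastD_eq_getLast?, List.getLastD_eq_getLast?] at hcl
      by_cases hp : xs.getLast?.getD "" = ""
      · simp_all
      · have hxne : xs ≠ [] := by rintro rfl; exact hp rfl
        have hfl : pvExpand (pvCollapse xs) ≠ [] := fun h => hxne (hnil.mp h)
        by_cases h40 : PySem.Str.len (xs.getLast?.getD "") > 40
        · simp_all
        · simp_all
          rw [if_neg (by omega), if_neg (by omega)]

lemma pvFoldB (xs : List String) :
    xs.foldl (fun acc s =>
      if s ≠ "" ∨ acc = [] ∨ acc.getLastD "" ≠ "" then acc ++ [s] else acc) []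
    = pvCollapse xs := by
  induction xs using List.reverseRecOn with
  | nil => rfl
  | append_singleton xs s ih =>
    have hl := pvCollapse_getLastD xs
    rw [List.getLastD_eq_getLast?, List.getLastD_eq_getLast?] at hl
    rw [List.foldl_append, List.foldl_cons, List.foldl_nil, ih, pvCollapse_snoc]
    split_ifs with h1 h2 h2 <;> simp_all [pvCollapse_eq_nil]

lemma pvFoldZip (t : List String) (p : String) (acc : List String) :
    (((p :: t).zip t).foldl
      (fun out (q : String × String) =>
        (if q.2 ≠ "" ∧ q.1 ≠ "" ∧ PySem.Str.len q.1 > 40 then out ++ [""] else out) ++ [q.2])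
      acc)
    = acc ++ pvExpandAux p t := by
  induction t generalizing p acc with
  | nil => simp [pvExpandAux]
  | cons s t ih =>
    simp only [List.zip_cons_cons, List.foldl_cons, pvExpandAux, ih]
    split_ifs <;> simp [List.append_assoc]

lemma pvTrim_app_replicate (d : List String) (k : Nat) :
    pvTrim (d ++ List.replicate k "") = pvTrim d := by
  induction k with
  | zero => simp
  | succ k ih =>
    rw [List.replicate_succ', ← List.append_assoc]
    simp only [pvTrim, List.reverse_append, List.reverse_cons, List.reverse_nil,
      List.nil_append, List.cons_append, List.dropWhile_cons] at *
    exact ih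

lemma pvTrim_of_last_ne (l : List String) (h : l.getLastD "" ≠ "") : pvTrim l = l := by
  cases hr : l.reverse with
  | nil => simp_all [pvTrim]
  | cons a r =>
    have ha : a = l.getLastD "" := by
      have := congrArg List.reverse hr
      simp at this
      subst this
      simp
    rw [pvTrim, hr, List.dropWhile_cons_of_neg (by simpa [ha] using h), ← hr, List.reverse_reverse]

lemma pvTrim_decompose (l : List String) :
    ∃ k, l = pvTrim l ++ List.replicate k "" ∧ (pvTrim l = [] ∨ (pvTrim l).getLastD "" ≠ "") := by
  refine ⟨(List.takeWhile (fun x => decide (x = "")) l.reverse).length, ?_, ?_⟩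
  · have hrep : List.takeWhile (fun x => decide (x = "")) l.reverse
        = List.replicate (List.takeWhile (fun x => decide (x = "")) l.reverse).length "" := by
      apply List.eq_replicate_of_mem
      intro b hb
      have := List.mem_takeWhile_imp hb
      simpa using this
    conv_lhs => rw [← l.reverse_reverse,
      ← List.takeWhile_append_dropWhile (p := fun x => decide (x = "")) (l := l.reverse),
      List.reverse_append, hrep, List.reverse_replicate]
    rfl
  · cases h : List.dropWhile (fun x => decide (x = "")) l.reverse with
    | nil => left; simp [pvTrim, h]
    | cons a r =>
      right
      have ha : (fun x => decide (x = "")) a = false := by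
        have := List.head?_dropWhile_not (fun x => decide (x = "")) l.reverse
        rw [h] at this; simpa using this
      simp only [pvTrim, h, List.reverse_cons]
      rw [pvGetLastD_app]
      simpa using ha

lemma pvExpand_app_replicate (d : List String) (k : Nat) :
    pvExpand (d ++ List.replicate k "") = pvExpand d ++ List.replicate k "" := by
  induction k with
  | zero => simp
  | succ k ih =>
    rw [List.replicate_succ', ← List.append_assoc, pvExpand_snoc, ih]
    simp

lemma pvTrim_expand (c : List String) : pvTrim (pvExpand c) = pvExpand (pvTrim c) := by
  obtain ⟨k, hdec, hlast⟩ := pvTrim_decompose c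
  conv_lhs => rw [hdec]
  rw [pvExpand_app_replicate, pvTrim_app_replicate]
  rcases hlast with h | h
  · rw [h]; rfl
  · exact pvTrim_of_last_ne _ (by rwa [pvExpand_getLastD])

-- ===== VERDICT (by name: the statement is the Claim_ definition above) =====
theorem improve_caption_spacing_spec : Claim_equal_improve_caption_spacing := by
  intro caption _
  unfold Spec_improve_caption_spacing improve_caption_spacing improve_caption_spacing_alt
  have hA := pvFoldA (((PySem.Str.split? caption "\n").getD []).map PySem.Str.strip)
  have hB := pvFoldB (((PySem.Str.split? caption "\n").getD []).map PySem.Str.strip)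
  rw [List.foldl_map] at hA hB
  simp only []
  rw [hA, hB]
  generalize pvCollapse (List.map PySem.Str.strip ((PySem.Str.split? caption "\n").getD [])) = c
  show PySem.Str.join "\n" (pvTrim (pvExpand c)) =
    (match pvTrim c with
     | [] => ""
     | c0 :: rest =>
       PySem.Str.join "\n" (((pvTrim c).zip rest).foldl
         (fun out (p : String × String) =>
           (if p.2 ≠ "" ∧ p.1 ≠ "" ∧ PySem.Str.len p.1 > 40 then out ++ [""] else out) ++ [p.2])
         [c0]))
  rw [pvTrim_expand]
  rcases h : pvTrim c with _ | ⟨c0, rest⟩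
  · rfl
  · show PySem.Str.join "\n" (pvExpand (c0 :: rest)) =
      PySem.Str.join "\n" (((c0 :: rest).zip rest).foldl
        (fun out (p : String × String) =>
          (if p.2 ≠ "" ∧ p.1 ≠ "" ∧ PySem.Str.len p.1 > 40 then out ++ [""] else out) ++ [p.2])
        [c0])
    rw [pvFoldZip]
    simp [pvExpand]
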